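-- pv_equiv track=rewrite | github.com/noah-rivard/news-coverage-a24-lionsgate | tools/compare_ab_outputs.py | _group_exec_items
-- ===== SOURCE A (Python) =====
-- from typing import Dict, Iterable, List, Optional, Tuple
--
-- EXEC_PREFIXES = ("exit:", "promotion:", "hiring:", "new role:")
--
-- def _is_exec_main_line(text: str) -> bool:
--     lowered = (text or "").strip().lower()
--     return any(lowered.startswith(p) for p in EXEC_PREFIXES)
--
-- def _group_exec_items(lines: Iterable[str]) -> List[Tuple[str, List[str]]]:
--     items: List[Tuple[str, List[str]]] = []
--     current_main: Optional[str] = None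
--     current_notes: List[str] = []
--     for line in lines:
--         if _is_exec_main_line(line):
--             if current_main is not None:
--                 items.append((current_main, current_notes))
--             current_main = line
--             current_notes = []
--             continue
--         if current_main is not None and (line or "").strip():
--             current_notes.append(line.strip())
--     if current_main is not None:
--         items.append((current_main, current_notes))
--     return items
-- ===== SOURCE B (Python) =====
-- from typing import Iterable, List, Tuple
--
-- EXEC_PREFIXES = ("exit:", "promotion:", "hiring:", "new role:")
--
-- def _is_exec_main_line(text: str) -> bool:
--     lowered = (text or "").strip().lower()
--     return any(lowered.startswith(p) for p in EXEC_PREFIXES)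
--
-- def _group_exec_items(lines: Iterable[str]) -> List[Tuple[str, List[str]]]:
--     # Two-phase: locate every header line first, then partition the lines
--     # lying between consecutive headers into that header's notes.
--     lines = list(lines)
--     heads = [i for i, l in enumerate(lines) if _is_exec_main_line(l)]
--     bounds = heads[1:] + [len(lines)]
--     return [
--         (lines[s], [lines[k].strip() for k in range(s + 1, e) if lines[k].strip()])
--         for s, e in zip(heads, bounds)
--     ]
-- ===== Notes on version B (the rewrite author's own statement) =====
-- stated objective: alternative
-- what changed: Replaces the stateful single pass (threading current_main/current_notes and flushing on each header) by a two-phase index computation: first collect the indices of all header lines, then for each consecutive pair of header indices slice out the lines between them as that item's notes.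
import Mathlib
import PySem

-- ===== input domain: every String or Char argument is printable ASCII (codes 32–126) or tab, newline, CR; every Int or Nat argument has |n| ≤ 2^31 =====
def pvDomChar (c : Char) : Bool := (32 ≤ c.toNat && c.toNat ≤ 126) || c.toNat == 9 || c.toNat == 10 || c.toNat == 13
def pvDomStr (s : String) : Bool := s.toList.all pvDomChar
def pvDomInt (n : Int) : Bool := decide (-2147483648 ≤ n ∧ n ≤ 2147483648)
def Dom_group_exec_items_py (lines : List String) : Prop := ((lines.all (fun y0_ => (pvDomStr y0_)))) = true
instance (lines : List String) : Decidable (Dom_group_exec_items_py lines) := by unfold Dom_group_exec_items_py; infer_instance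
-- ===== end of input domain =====

-- B replaces A's stateful single pass by a two-phase index computation: collect the
-- indices of all header lines first, then slice the notes between consecutive headers.

-- shared helper (the Python versions share _is_exec_main_line too)
def execPrefixes : List String := ["exit:", "promotion:", "hiring:", "new role:"]

def isExecMainLine (text : String) : Bool :=
  let lowered := PySem.Str.lower (PySem.Str.strip text)
  execPrefixes.any (fun p => PySem.Str.startswith lowered p)

-- ===== PORT A =====
def groupStepA (st : List (String × List String) × Option String × List String) (line : String) :
    List (String × List String) × Option String × List String :=
  let (items, currentMain, currentNotes) := st
  if isExecMainLine line then
    ((match currentMain with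
      | none => items
      | some m => items ++ [(m, currentNotes)]), some line, [])
  else if currentMain.isSome && !(PySem.Str.strip line == "") then
    (items, currentMain, currentNotes ++ [PySem.Str.strip line])
  else
    (items, currentMain, currentNotes)

-- the final 'if current_main is not None: items.append(...)'
def finalizeA (st : List (String × List String) × Option String × List String) :
    List (String × List String) :=
  match st.2.1 with
  | none => st.1
  | some m => st.1 ++ [(m, st.2.2)]

def group_exec_items_py (lines : List String) : List (String × List String) :=
  finalizeA (lines.foldl groupStepA ([], none, []))

-- ===== PORT B =====
def group_exec_items_py_alt (lines : List String) : List (String × List String) :=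
  -- heads = [i for i, l in enumerate(lines) if _is_exec_main_line(l)]
  let heads := lines.zipIdx.filterMap (fun p => if isExecMainLine p.1 then some p.2 else none)
  -- bounds = heads[1:] + [len(lines)]
  let bounds := heads.drop 1 ++ [lines.length]
  -- [(lines[s], [lines[k].strip() for k in range(s+1, e) if lines[k].strip()]) for s, e in zip(heads, bounds)]
  (heads.zip bounds).map (fun se =>
    (lines.getD se.1 "",
     (List.range' (se.1 + 1) (se.2 - (se.1 + 1))).filterMap (fun k =>
        if PySem.Str.strip (lines.getD k "") ≠ "" then some (PySem.Str.strip (lines.getD k "")) else none)))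

-- ===== PRECONDITION & SPEC =====
def Spec_group_exec_items_py (lines : List String) (out : List (String × List String)) : Prop := out = group_exec_items_py_alt lines
instance (lines : List String) (out : List (String × List String)) : Decidable (Spec_group_exec_items_py lines out) := by unfold Spec_group_exec_items_py; infer_instance

-- ===== CLAIM (what is proved, stated in full; the proofs are below) =====
def Claim_equal_group_exec_items_py : Prop := ∀ (lines : List String), Dom_group_exec_items_py lines → Spec_group_exec_items_py lines (group_exec_items_py lines)

-- ===== LEMMAS AND PROOFS =====

-- stripped non-blank notes of a list of raw lines
def noteFilter (rest : List String) : List String :=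
  rest.filterMap (fun l => if PySem.Str.strip l ≠ "" then some (PySem.Str.strip l) else none)

-- notes taken by index from the full list
def noteIdx (u : List String) (a m : Nat) : List String :=
  (List.range' a m).filterMap (fun k =>
    if PySem.Str.strip (u.getD k "") ≠ "" then some (PySem.Str.strip (u.getD k "")) else none)

-- header indices starting at offset k
def headsFrom (u : List String) (k : Nat) : List Nat :=
  (u.zipIdx k).filterMap (fun p => if isExecMainLine p.1 then some p.2 else none)

-- common recursive description: one item per header segment
def gspec : List String → List (String × List String)
  | [] => []
  | l :: t =>
    if isExecMainLine l then
      (l, noteFilter (t.takeWhile (fun x => !isExecMainLine x))) ::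
        gspec (t.dropWhile (fun x => !isExecMainLine x))
    else gspec t
termination_by u => u.length
decreasing_by
  · exact Nat.lt_succ_of_le (List.length_dropWhile_le _ _)
  · exact Nat.lt_succ_self _

theorem gspec_dropWhile (t : List String) :
    gspec (t.dropWhile (fun x => !isExecMainLine x)) = gspec t := by
  induction t with
  | nil => rfl
  | cons l t ih =>
    by_cases h : isExecMainLine l
    · simp [h]
    · simp [h, gspec, ih]

-- ===== A-side: the fold equals gspec =====

theorem a_some (lines : List String) :
    ∀ (items : List (String × List String)) (m : String) (notes : List String),
      finalizeA (lines.foldl groupStepA (items, some m, notes)) =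
        items ++ (m, notes ++ noteFilter (lines.takeWhile (fun x => !isExecMainLine x))) ::
          gspec (lines.dropWhile (fun x => !isExecMainLine x)) := by
  induction lines with
  | nil => intro items m notes; simp [finalizeA, noteFilter, gspec]
  | cons l t ih =>
    intro items m notes
    by_cases h : isExecMainLine l
    · have hstep : groupStepA (items, some m, notes) l = (items ++ [(m, notes)], some l, []) := by
        simp [groupStepA, h]
      simp only [List.foldl_cons, hstep, ih]
      simp [h, gspec, noteFilter]
    · by_cases hs : (PySem.Str.strip l == "") = true
      · have hstep : groupStepA (items, some m, notes) l = (items, some m, notes) := by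
          simp [groupStepA, h, hs]
        simp only [List.foldl_cons, hstep, ih]
        have : PySem.Str.strip l = "" := by simpa using hs
        simp [h, noteFilter, this]
      · have hstep : groupStepA (items, some m, notes) l
            = (items, some m, notes ++ [PySem.Str.strip l]) := by
          simp [groupStepA, h, hs]
        simp only [List.foldl_cons, hstep, ih]
        have : ¬ PySem.Str.strip l = "" := by simpa using hs
        simp [h, noteFilter, this]

theorem a_none (lines : List String) :
    ∀ (items : List (String × List String)),
      finalizeA (lines.foldl groupStepA (items, none, [])) = items ++ gspec lines := by
  induction lines with
  | nil => intro items; simp [finalizeA, gspec]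
  | cons l t ih =>
    intro items
    by_cases h : isExecMainLine l
    · have hstep : groupStepA (items, none, []) l = (items, some l, []) := by
        simp [groupStepA, h]
      simp only [List.foldl_cons, hstep, a_some]
      simp [gspec, h]
    · have hstep : groupStepA (items, none, []) l = (items, none, []) := by
        simp [groupStepA, h]
      simp only [List.foldl_cons, hstep, ih]
      simp [gspec, h]

-- ===== B-side: the index computation equals gspec =====

theorem heads_cons (l : String) (t : List String) (k : Nat) :
    headsFrom (l :: t) k =
      if isExecMainLine l then k :: headsFrom t (k + 1) else headsFrom t (k + 1) := by
  by_cases h : isExecMainLine l <;> simp [headsFrom, List.zipIdx_cons, h]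

theorem heads_shift (t : List String) : ∀ k, headsFrom t (k + 1) = (headsFrom t k).map (· + 1) := by
  induction t with
  | nil => intro k; simp [headsFrom]
  | cons l t ih =>
    intro k
    by_cases h : isExecMainLine l <;> simp [heads_cons, h, ih (k + 1)]

theorem no_heads (t : List String) (h : headsFrom t 0 = []) :
    t.takeWhile (fun x => !isExecMainLine x) = t ∧
      t.dropWhile (fun x => !isExecMainLine x) = [] := by
  induction t with
  | nil => exact ⟨rfl, rfl⟩
  | cons l t ih =>
    by_cases hl : isExecMainLine l
    · simp [heads_cons, hl] at h
    · rw [heads_cons] at h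
      simp only [hl, if_neg, Bool.false_eq_true, not_false_eq_true] at h
      rw [heads_shift] at h
      have h0 : headsFrom t 0 = [] := by simpa using h
      obtain ⟨h1, h2⟩ := ih h0
      constructor <;> simp [hl, h1, h2]

theorem first_head (t : List String) :
    ∀ (h : Nat) (rest : List Nat), headsFrom t 0 = h :: rest →
      t.take h = t.takeWhile (fun x => !isExecMainLine x) := by
  induction t with
  | nil => intro h rest hh; simp [headsFrom] at hh
  | cons l t ih =>
    intro h rest hh
    by_cases hl : isExecMainLine l
    · rw [heads_cons, if_pos hl] at hh
      have : h = 0 := by exact (List.cons.injEq _ _ _ _ ▸ hh).1.symm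
      subst this
      simp [hl]
    · rw [heads_cons, if_neg hl, heads_shift] at hh
      rcases h0 : headsFrom t 0 with _ | ⟨h', rest'⟩
      · rw [h0] at hh; simp at hh
      · rw [h0] at hh
        simp only [List.map_cons] at hh
        have hh1 : h = h' + 1 := ((List.cons.injEq _ _ _ _).mp hh).1.symm
        subst hh1
        simp [hl, List.take_succ_cons, ih h' rest' h0]

theorem strip_empty : PySem.Str.strip "" = "" := by decide

theorem noteIdx_eq (u : List String) : ∀ (m a : Nat), noteIdx u a m = noteFilter ((u.drop a).take m) := by
  intro m
  induction m with
  | zero => intro a; simp [noteIdx, noteFilter]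
  | succ m ih =>
    intro a
    rw [noteIdx, List.range'_succ, List.filterMap_cons]
    by_cases h : a < u.length
    · have hd : u.drop a = u[a] :: u.drop (a + 1) := List.drop_eq_getElem_cons h
      have hg : u.getD a "" = u[a] := by simp [List.getD_eq_getElem?_getD, h]
      have htail := ih (a + 1)
      rw [noteIdx] at htail
      rw [hd, List.take_succ_cons, hg]
      simp only [List.getD, noteFilter, ne_eq, ite_not] at htail
      by_cases hs : PySem.Str.strip u[a] = "" <;>
        simp [hs, noteFilter, List.getD, htail]
    · have hlen : u.length ≤ a := Nat.le_of_not_lt h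
      have hg : u.getD a "" = "" := List.getD_eq_default _ _ hlen
      have hd1 : u.drop a = [] := List.drop_eq_nil_of_le hlen
      have hd2 : u.drop (a + 1) = [] := List.drop_eq_nil_of_le (Nat.le_succ_of_le hlen)
      have htail := ih (a + 1)
      rw [noteIdx, hd2] at htail
      simp only [List.getD, noteFilter, ne_eq, ite_not, List.take_nil, List.filterMap_nil] at htail
      simp only [List.getD] at hg
      simp [hg, strip_empty, hd1, noteFilter, List.getD, htail]

theorem noteIdx_shift (l : String) (t : List String) (a m : Nat) :
    noteIdx (l :: t) (a + 1) m = noteIdx t a m := by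
  rw [noteIdx_eq, noteIdx_eq, List.drop_succ_cons]

-- B's port viewed through headsFrom/noteIdx (definitionally the same computation)
def altView (lines : List String) : List (String × List String) :=
  ((headsFrom lines 0).zip ((headsFrom lines 0).drop 1 ++ [lines.length])).map (fun se =>
    (lines.getD se.1 "", noteIdx lines (se.1 + 1) (se.2 - (se.1 + 1))))

theorem alt_eq_view (lines : List String) : group_exec_items_py_alt lines = altView lines := rfl

theorem altView_shifted_tail (l : String) (t : List String) (H : List Nat) :
    ((H.map (· + 1)).zip ((H.map (· + 1)).drop 1 ++ [t.length + 1])).map (fun se =>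
        ((l :: t).getD se.1 "", noteIdx (l :: t) (se.1 + 1) (se.2 - (se.1 + 1)))) =
      (H.zip (H.drop 1 ++ [t.length])).map (fun se =>
        (t.getD se.1 "", noteIdx t (se.1 + 1) (se.2 - (se.1 + 1)))) := by
  have hb : (H.map (· + 1)).drop 1 ++ [t.length + 1] = (H.drop 1 ++ [t.length]).map (· + 1) := by
    simp
  rw [hb, List.zip_map]
  rw [List.map_map]
  apply List.map_congr_left
  intro se _
  rcases se with ⟨s, e⟩
  simp only [Function.comp, Prod.map]
  have h1 : (l :: t).getD (s + 1) "" = t.getD s "" := by simp [List.getD]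
  have h2 : e + 1 - (s + 1 + 1) = e - (s + 1) := by omega
  rw [h1, h2, noteIdx_shift]

theorem altView_gspec (lines : List String) : altView lines = gspec lines := by
  induction lines with
  | nil => simp [altView, headsFrom, gspec]
  | cons l t ih =>
    by_cases h : isExecMainLine l
    · rcases h0 : headsFrom t 0 with _ | ⟨hd, rest⟩
      · obtain ⟨h1, h2⟩ := no_heads t h0
        have hh : headsFrom (l :: t) 0 = [0] := by
          rw [heads_cons, if_pos h, heads_shift, h0]; rfl
        rw [altView, hh]
        simp only [List.drop_succ_cons, List.drop_nil, List.nil_append, List.zip_cons_cons,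
          List.zip_nil_right, List.map_cons, List.map_nil, List.length_cons]
        rw [gspec]
        simp only [h, if_pos, h1, h2, gspec]
        have : noteIdx (l :: t) 1 t.length = noteFilter t := by
          rw [noteIdx_eq]
          simp
        simp [List.getD, this]
      · have hh : headsFrom (l :: t) 0 = 0 :: (hd + 1) :: rest.map (· + 1) := by
          rw [heads_cons, if_pos h, heads_shift, h0]; rfl
        rw [altView, hh]
        have hzip : (0 :: (hd + 1) :: rest.map (· + 1)).zip
              ((0 :: (hd + 1) :: rest.map (· + 1)).drop 1 ++ [(l :: t).length])
            = (0, hd + 1) :: (((hd :: rest).map (· + 1)).zip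
                (((hd :: rest).map (· + 1)).drop 1 ++ [t.length + 1])) := by
          simp
        rw [hzip, List.map_cons]
        rw [altView_shifted_tail l t (hd :: rest)]
        have htail : (((hd :: rest).zip ((hd :: rest).drop 1 ++ [t.length])).map (fun se =>
            (t.getD se.1 "", noteIdx t (se.1 + 1) (se.2 - (se.1 + 1))))) = gspec t := by
          rw [← h0] at *
          rw [← altView]
          exact ih
        rw [htail, gspec]
        simp only [h, if_pos]
        rw [gspec_dropWhile]
        have hfirst : noteIdx (l :: t) 1 hd =
            noteFilter (t.takeWhile (fun x => !isExecMainLine x)) := by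
          rw [noteIdx_eq]
          simp only [List.drop_succ_cons, List.drop_zero]
          rw [first_head t hd rest h0]
        simp [List.getD, hfirst]
    · have hh : headsFrom (l :: t) 0 = (headsFrom t 0).map (· + 1) := by
        rw [heads_cons, if_neg h, heads_shift]
      rw [altView, hh]
      have hl : (l :: t).length = t.length + 1 := rfl
      rw [hl, altView_shifted_tail l t (headsFrom t 0), ← altView, ih, gspec]
      simp [h]

-- ===== VERDICT (by name: the statement is the Claim_ definition above) =====
theorem group_exec_items_py_spec : Claim_equal_group_exec_items_py := by
  intro lines _
  unfold Spec_group_exec_items_py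
  rw [alt_eq_view, altView_gspec]
  unfold group_exec_items_py
  simpa using a_none lines []
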